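-- pv_equiv track=rewrite | github.com/khidir1404/Vendor_Due_Diligence | Google_CSE/main.py | _generate_company_variations
-- ===== SOURCE A (Python) =====
-- from typing import List, Dict, Optional, Tuple, Any
--
-- def _generate_company_variations(company_name: str) -> List[str]:
--     """Generate company name variations for better matching"""
--     variations = [company_name]
--
--     # Remove common suffixes
--     suffixes = ["Inc", "Corp", "Corporation", "LLC", "Ltd", "Limited", "Co"]
--     base_name = company_name
--     for suffix in suffixes:
--         if base_name.endswith(f" {suffix}"):
--             base_name = base_name[:-len(f" {suffix}")]
--             variations.append(base_name)
--
--     # Add variations with/without periods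
--     variations.extend([name.replace(".", "") for name in variations])
--     variations.extend([name + "." for name in variations if not name.endswith(".")])
--
--     return list(set(variations))
-- ===== SOURCE B (Python) =====
-- def _generate_company_variations(company_name: str) -> list:
--     """Generate company name variations for better matching."""
--     suffixes = ["Inc", "Corp", "Corporation", "LLC", "Ltd", "Limited", "Co"]
--
--     def chain(name, sufs):
--         # successive suffix-stripped forms, by recursion on the suffix list
--         if not sufs:
--             return []
--         tail = " " + sufs[0]
--         if name.endswith(tail):
--             shorter = name[: len(name) - len(tail)]
--             return [shorter] + chain(shorter, sufs[1:])
--         return chain(name, sufs[1:])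
--
--     def distinct(xs):
--         # first-occurrence dedup by recursive head-filtering (no hash set)
--         if not xs:
--             return []
--         rest = distinct(xs[1:])
--         return [xs[0]] + [x for x in rest if x != xs[0]]
--
--     bases = [company_name] + chain(company_name, suffixes)
--     undotted = [b.replace(".", "") for b in bases]
--     # an undotted form contains no ".", so it never ends with a period
--     stream = (bases + undotted
--               + [b + "." for b in bases if not b.endswith(".")]
--               + [u + "." for u in undotted])
--     return distinct(stream)
-- ===== Notes on version B (the rewrite author's own statement) =====
-- stated objective: alternative
-- what changed: B replaces A's in-place machinery end to end: the suffix chain is computed by recursion on the suffix list instead of a mutating for-loop, the hash-based set dedup is replaced by a recursive head-filtering dedup (keep the head, filter it out of the deduped tail), and the dotted forms of the period-stripped variants are emitted unconditionally using the fact that a period-stripped name can never end with a period, so A's second growing-list broadcast with its endswith filter disappears; the result is A's exact set, in deterministic first-occurrence order (A's list order is hash-seed dependent).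
import Mathlib
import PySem

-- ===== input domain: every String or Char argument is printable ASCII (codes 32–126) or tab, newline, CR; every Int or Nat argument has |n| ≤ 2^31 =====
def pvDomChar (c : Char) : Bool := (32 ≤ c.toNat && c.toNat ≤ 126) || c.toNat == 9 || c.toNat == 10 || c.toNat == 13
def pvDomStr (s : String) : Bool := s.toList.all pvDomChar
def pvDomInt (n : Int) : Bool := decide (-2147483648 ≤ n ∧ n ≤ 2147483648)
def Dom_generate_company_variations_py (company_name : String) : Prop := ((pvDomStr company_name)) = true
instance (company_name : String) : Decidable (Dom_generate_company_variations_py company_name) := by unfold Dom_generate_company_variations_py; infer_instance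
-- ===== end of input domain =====

-- B is an alternative decomposition: the suffix chain is computed by recursion on the suffix list,
-- dedup is a recursive head-filter (no hash set), and the dotted forms of the period-stripped
-- variants are emitted unconditionally (a period-stripped name never ends with a period).

-- ===== PORT A =====
-- A's suffix-stripping for-loop: state = (base_name, variations list)
def pvStripSuffixes (company_name : String) : String × List String :=
  ["Inc", "Corp", "Corporation", "LLC", "Ltd", "Limited", "Co"].foldl
    (fun st suffix =>
      if PySem.Str.endswith st.1 (" " ++ suffix) then
        let nb := PySem.Str.slice st.1 none (some (-(PySem.Str.len (" " ++ suffix))))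
        (nb, st.2 ++ [nb])
      else st)
    (company_name, [company_name])

def generate_company_variations_py (company_name : String) : List String :=
  let variations := (pvStripSuffixes company_name).2
  let variations := variations ++ variations.map (fun name => PySem.Str.replace name "." "")
  let variations := variations ++
    (variations.filter (fun name => !(PySem.Str.endswith name "."))).map (fun name => name ++ ".")
  PySem.Set.ofList variations

-- ===== PORT B =====
-- Source B's `chain`: successive suffix-stripped forms, by recursion on the suffix list
def pvChain (name : String) : List String → List String
  | [] => []
  | s :: sufs =>
    let tail := " " ++ s
    if PySem.Str.endswith name tail then
      let shorter := PySem.Str.slice name none (some (PySem.Str.len name - PySem.Str.len tail))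
      shorter :: pvChain shorter sufs
    else pvChain name sufs

-- Source B's `distinct`: first-occurrence dedup by recursive head-filtering
def pvDistinct : List String → List String
  | [] => []
  | x :: xs => x :: (pvDistinct xs).filter (fun y => y != x)

def generate_company_variations_py_alt (company_name : String) : List String :=
  let bases := company_name :: pvChain company_name ["Inc", "Corp", "Corporation", "LLC", "Ltd", "Limited", "Co"]
  let undotted := bases.map (fun b => PySem.Str.replace b "." "")
  let stream := bases ++ undotted
      ++ (bases.filter (fun b => !(PySem.Str.endswith b "."))).map (fun b => b ++ ".")
      ++ undotted.map (fun u => u ++ ".")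
  pvDistinct stream

-- ===== PRECONDITION & SPEC =====
def Spec_generate_company_variations_py (company_name : String) (out : List String) : Prop := out = generate_company_variations_py_alt company_name
instance (company_name : String) (out : List String) : Decidable (Spec_generate_company_variations_py company_name out) := by unfold Spec_generate_company_variations_py; infer_instance

-- ===== CLAIM (what is proved, stated in full; the proofs are below) =====
def Claim_equal_generate_company_variations_py : Prop := ∀ (company_name : String), Dom_generate_company_variations_py company_name → Spec_generate_company_variations_py company_name (generate_company_variations_py company_name)

-- ===== LEMMAS AND PROOFS =====

-- PySem.Set.ofList characterised recursively: head, then the deduped tail with the head filtered out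
theorem pv_foldl_add {α : Type} [BEq α] [LawfulBEq α] (l s : List α) :
    List.foldl PySem.Set.add s l
      = s ++ (PySem.Set.ofList l).filter (fun x => !s.contains x) := by
  induction l generalizing s with
  | nil => simp [PySem.Set.ofList]
  | cons y ys ih =>
    have hol : PySem.Set.ofList (y :: ys)
        = List.foldl PySem.Set.add (PySem.Set.add [] y) ys := by
      simp [PySem.Set.ofList, PySem.Set.empty, List.foldl]
    have hadd0 : PySem.Set.add ([] : List α) y = [y] := by
      simp [PySem.Set.add, PySem.Set.contains]
    rw [List.foldl_cons, ih, hol, hadd0, ih]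
    by_cases hy : y ∈ s
    · have hs : PySem.Set.add s y = s := by
        simp [PySem.Set.add, PySem.Set.contains, hy]
      rw [hs]
      have h0 : List.filter (fun x => !s.contains x) [y] = [] := by simp [hy]
      rw [List.filter_append, h0, List.nil_append, List.filter_filter]
      congr 1
      apply List.filter_congr
      intro x _
      by_cases hxy : x = y
      · subst hxy; simp [hy]
      · simp [hxy]
    · have hs : PySem.Set.add s y = s ++ [y] := by
        simp [PySem.Set.add, PySem.Set.contains, hy]
      rw [hs]
      have h0 : List.filter (fun x => !s.contains x) [y] = [y] := by simp [hy]
      rw [List.filter_append, h0, List.filter_filter, List.append_assoc]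
      congr 2
      apply List.filter_congr
      intro x _
      by_cases hxy : x = y
      · subst hxy; simp
      · simp [hxy]

theorem pv_ofList_cons {α : Type} [BEq α] [LawfulBEq α] (y : α) (ys : List α) :
    PySem.Set.ofList (y :: ys) = y :: (PySem.Set.ofList ys).filter (fun x => !(x == y)) := by
  have : PySem.Set.ofList (y :: ys) = List.foldl PySem.Set.add [y] ys := by
    simp [PySem.Set.ofList, PySem.Set.empty, List.foldl, PySem.Set.add]
  rw [this, pv_foldl_add]
  simp

-- Source B's recursive head-filter dedup computes list(set(..)) insertion order
theorem pv_distinct_eq_ofList (l : List String) :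
    pvDistinct l = PySem.Set.ofList l := by
  induction l with
  | nil => simp [pvDistinct, PySem.Set.ofList]
  | cons x xs ih =>
    rw [pvDistinct, ih, pv_ofList_cons]
    simp [bne]

-- replace s "." "" is a character filter
theorem pv_replace_go_dot : ∀ (fuel : Nat) (l acc : List Char), l.length ≤ fuel →
    PySem.Chars.replace.go ['.'] [] fuel l acc = acc.reverse ++ l.filter (fun c => c != '.') := by
  intro fuel
  induction fuel with
  | zero =>
    intro l acc h
    have : l = [] := by cases l with
      | nil => rfl
      | cons c t => simp at h
    subst this
    simp [PySem.Chars.replace.go]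
  | succ n ih =>
    intro l acc h
    cases l with
    | nil => simp [PySem.Chars.replace.go]
    | cons c t =>
      by_cases hc : c = '.'
      · subst hc
        have hpre : List.isPrefixOf ['.'] ('.' :: t) = true := by simp [List.isPrefixOf]
        simp only [PySem.Chars.replace.go, hpre, if_true]
        have := ih t acc (by simp at h; omega)
        simpa using this
      · have hpre : List.isPrefixOf ['.'] (c :: t) = false := by
          simp only [List.isPrefixOf, Bool.and_eq_false_iff, beq_eq_false_iff_ne]
          exact Or.inl fun h => hc h.symm
        simp only [PySem.Chars.replace.go, hpre]
        rw [ih t (c :: acc) (by simp at h; omega)]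
        simp only [List.reverse_cons, List.filter_cons]
        have hbne : (c != '.') = true := by simp [hc]
        rw [hbne]
        simp

theorem pv_replace_dot_filter (l : List Char) :
    PySem.Chars.replace l ['.'] [] = l.filter (fun c => c != '.') := by
  rw [PySem.Chars.replace]
  simp only [List.isEmpty_cons]
  simpa using pv_replace_go_dot l.length l [] le_rfl

-- a period-stripped name never ends with a period
theorem pv_nodot_not_endswith (s : String) :
    PySem.Str.endswith (PySem.Str.replace s "." "") "." = false := by
  have hto : (PySem.Str.replace s "." "").toList = s.toList.filter (fun c => c != '.') := by
    rw [PySem.Str.toList_replace]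
    have h1 : (".".toList : List Char) = ['.'] := by decide
    have h2 : ("".toList : List Char) = [] := by decide
    rw [h1, h2, pv_replace_dot_filter]
  rw [PySem.Str.endswith_eq]
  by_contra hend
  rw [Bool.not_eq_false] at hend
  have hsuf : (".".toList : List Char) <:+ (PySem.Str.replace s "." "").toList :=
    (PySem.Chars.endswith_iff _ _).mp hend
  have hmem : '.' ∈ (PySem.Str.replace s "." "").toList := by
    have : '.' ∈ (".".toList : List Char) := by decide
    exact hsuf.subset this
  rw [hto] at hmem
  simp at hmem

-- A's negative-stop slice equals B's nonnegative-stop slice when the suffix really is there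
theorem pv_slice_neg_eq (b t : String) (ht : t.toList ≠ [])
    (h : PySem.Str.endswith b t = true) :
    PySem.Str.slice b none (some (-(PySem.Str.len t)))
      = PySem.Str.slice b none (some (PySem.Str.len b - PySem.Str.len t)) := by
  have hsuf : t.toList <:+ b.toList := by
    rw [PySem.Str.endswith_eq] at h
    exact (PySem.Chars.endswith_iff _ _).mp h
  have hle : t.toList.length ≤ b.toList.length := hsuf.length_le
  have hpos : 0 < t.toList.length := by
    cases hl : t.toList with
    | nil => exact absurd hl ht
    | cons _ _ => simp
  apply String.toList_injective
  rw [PySem.Str.toList_slice, PySem.Str.toList_slice,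
      PySem.Chars.slice_eq_listSlice, PySem.Chars.slice_eq_listSlice,
      PySem.Str.len_eq, PySem.Str.len_eq]
  rw [PySem.List.slice_to_neg_natCast _ _ hpos]
  rw [PySem.List.slice_to _ (by omega)]
  congr 1
  omega

-- A's for-loop and Source B's recursive chain produce the same bases list
theorem pv_bases_eq (sufs : List String) (hs : ∀ s ∈ sufs, s ≠ "") :
    ∀ (b : String) (acc : List String),
    (sufs.foldl
      (fun st suffix =>
        if PySem.Str.endswith st.1 (" " ++ suffix) then
          let nb := PySem.Str.slice st.1 none (some (-(PySem.Str.len (" " ++ suffix))))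
          (nb, st.2 ++ [nb])
        else st)
      (b, acc)).2 = acc ++ pvChain b sufs := by
  induction sufs with
  | nil => intro b acc; simp [pvChain]
  | cons s rest ih =>
    intro b acc
    have hs' : ∀ x ∈ rest, x ≠ "" := fun x hx => hs x (List.mem_cons_of_mem _ hx)
    by_cases hend : PySem.Str.endswith b (" " ++ s) = true
    · have hne : (" " ++ s).toList ≠ [] := by
        simp [String.toList_append]
      rw [List.foldl_cons]
      simp only [hend, if_true]
      rw [ih hs', pvChain]
      simp only [hend, if_true]
      rw [pv_slice_neg_eq _ _ hne hend]
      simp [List.append_assoc]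
    · rw [List.foldl_cons]
      simp only [hend]
      rw [if_neg (fun h : (false:Bool) = true => by simp at h), ih hs', pvChain]
      rw [if_neg hend]

-- ===== VERDICT (by name: the statement is the Claim_ definition above) =====
-- the staged candidate list of A equals the grouped stream of B, after first-occurrence dedup
theorem pv_key (V : List String) :
    PySem.Set.ofList (V ++ V.map (fun name => PySem.Str.replace name "." "") ++
      ((V ++ V.map (fun name => PySem.Str.replace name "." "")).filter
        (fun name => !(PySem.Str.endswith name "."))).map (fun name => name ++ ".")) =
    pvDistinct (V ++ V.map (fun b => PySem.Str.replace b "." "") ++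
      (V.filter (fun b => !(PySem.Str.endswith b "."))).map (fun b => b ++ ".") ++
      (V.map (fun b => PySem.Str.replace b "." "")).map (fun u => u ++ ".")) := by
  rw [pv_distinct_eq_ofList]
  congr 1
  have hN : (V.map (fun b => PySem.Str.replace b "." "")).filter
      (fun name => !(PySem.Str.endswith name ".")) = V.map (fun b => PySem.Str.replace b "." "") := by
    apply List.filter_eq_self.mpr
    intro a ha
    obtain ⟨b, _, rfl⟩ := List.mem_map.mp ha
    simpa using pv_nodot_not_endswith b
  rw [List.filter_append, hN, List.map_append, List.append_assoc, List.append_assoc,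
      List.append_assoc]

-- ===== VERDICT (by name: the statement is the Claim_ definition above) =====
theorem generate_company_variations_py_spec : Claim_equal_generate_company_variations_py := by
  intro company_name _
  unfold Spec_generate_company_variations_py
  have hbases : (pvStripSuffixes company_name).2
      = company_name :: pvChain company_name ["Inc", "Corp", "Corporation", "LLC", "Ltd", "Limited", "Co"] := by
    unfold pvStripSuffixes
    rw [pv_bases_eq _ (by intro s hs; fin_cases hs <;> decide)]
    rfl
  simp only [generate_company_variations_py, generate_company_variations_py_alt, hbases]
  generalize (company_name :: pvChain company_name ["Inc", "Corp", "Corporation", "LLC", "Ltd", "Limited", "Co"]) = V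
  exact pv_key V
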